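-- pv_equiv track=rewrite | github.com/Alukard-007/Applied-Linear-Algebra-Using-Python | A. Applied Linear Algebra Self-Made Functions/ALA-Self-Made-Functions.py | zeroColCount
-- ===== SOURCE A (Python) =====
-- def zeroColCount(matrix): #checks for the presence of zero rows and returns list of zero column positions
--     zeroCols = list()
--     for j in range(len(matrix[0])):
--         s=0
--         for i in range(len(matrix)):
--             s = s + abs(matrix[i][j])
--         if(s==0):
--             zeroCols.append(j)
--     return zeroCols
-- ===== SOURCE B (Python) =====
-- def zeroColCount(matrix):
--     # Row-major single pass: keep the still-all-zero candidate columns and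
--     # prune them as each row is scanned, instead of summing abs per column.
--     cand = list(range(len(matrix[0])))
--     for row in matrix:
--         cand = [j for j in cand if row[j] == 0]
--     return cand
-- ===== Notes on version B (the rewrite author's own statement) =====
-- stated objective: faster
-- what changed: Column-major abs-sum per column replaced by a row-major single pass that keeps a shrinking list of candidate zero columns and prunes it at each row.
import Mathlib
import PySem

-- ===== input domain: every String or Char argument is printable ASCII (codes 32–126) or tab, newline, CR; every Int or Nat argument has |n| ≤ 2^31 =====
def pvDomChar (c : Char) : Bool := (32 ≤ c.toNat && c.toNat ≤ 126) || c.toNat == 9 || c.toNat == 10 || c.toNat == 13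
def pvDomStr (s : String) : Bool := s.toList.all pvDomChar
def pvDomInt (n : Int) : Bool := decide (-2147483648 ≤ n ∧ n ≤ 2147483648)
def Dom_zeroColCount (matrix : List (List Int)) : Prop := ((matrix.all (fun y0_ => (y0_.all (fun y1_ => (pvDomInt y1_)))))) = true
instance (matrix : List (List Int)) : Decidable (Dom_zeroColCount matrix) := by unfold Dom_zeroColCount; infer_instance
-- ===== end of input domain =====

-- B replaces A's column-major abs-sum with a row-major pass pruning a candidate-column list (alternative decomposition, same result).


-- ===== PORT A =====
def zeroColCount (matrix : List (List Int)) : List Int :=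
  (PySem.List.pyRange 0 ((PySem.List.pyGetD matrix 0 []).length : Int) 1).foldl
    (fun zeroCols j =>
      let s : Int := (PySem.List.pyRange 0 (matrix.length : Int) 1).foldl
        (fun s i => s + |PySem.List.pyGetD (PySem.List.pyGetD matrix i []) j 0|) 0
      if s = 0 then zeroCols ++ [j] else zeroCols)
    []

-- ===== PORT B =====
def zeroColCount_alt (matrix : List (List Int)) : List Int :=
  matrix.foldl
    (fun cand row => cand.filter (fun j => PySem.List.pyGetD row j 0 == 0))
    (PySem.List.pyRange 0 ((PySem.List.pyGetD matrix 0 []).length : Int) 1)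

-- ===== PRECONDITION & SPEC =====
-- Pre_ excludes exactly the inputs where A raises IndexError: the empty matrix
-- (matrix[0]) and matrices with a row shorter than the first row (matrix[i][j]).
def Pre_zeroColCount (matrix : List (List Int)) : Prop :=
  matrix ≠ [] ∧ ∀ row ∈ matrix, (PySem.List.pyGetD matrix 0 []).length ≤ row.length
instance (matrix : List (List Int)) : Decidable (Pre_zeroColCount matrix) := by
  unfold Pre_zeroColCount; infer_instance
def pvWitness_zeroColCount : List (List Int) := [[1, 0, 0], [0, 0, 3]]
def Spec_zeroColCount (matrix : List (List Int)) (out : List Int) : Prop := out = zeroColCount_alt matrix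
instance (matrix : List (List Int)) (out : List Int) : Decidable (Spec_zeroColCount matrix out) := by unfold Spec_zeroColCount; infer_instance

-- ===== CLAIM (what is proved, stated in full; the proofs are below) =====
def Claim_equal_zeroColCount : Prop := ∀ (matrix : List (List Int)), Dom_zeroColCount matrix → Pre_zeroColCount matrix → Spec_zeroColCount matrix (zeroColCount matrix)

-- ===== LEMMAS AND PROOFS =====

-- B's fold of per-row filters is one filter by "every row is zero at j".
lemma foldl_filter_rows (rows : List (List Int)) (cand : List Int) :
    rows.foldl (fun c row => c.filter (fun j => PySem.List.pyGetD row j 0 == 0)) cand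
      = cand.filter (fun j => rows.all (fun row => PySem.List.pyGetD row j 0 == 0)) := by
  induction rows generalizing cand with
  | nil => simp
  | cons r rs ih =>
      simp only [List.foldl_cons, ih, List.filter_filter, List.all_cons]
      exact List.filter_congr (fun j _ => Bool.and_comm _ _)

-- a sum of absolute values vanishes iff every entry vanishes
lemma sum_abs_eq_zero (rows : List (List Int)) (j : Int) :
    ((rows.map (fun row => |PySem.List.pyGetD row j 0|)).sum = 0)
      ↔ (∀ row ∈ rows, PySem.List.pyGetD row j 0 = 0) := by
  induction rows with
  | nil => simp
  | cons r rs ih =>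
      have hr : 0 ≤ |PySem.List.pyGetD r j 0| := abs_nonneg _
      have hs : 0 ≤ ((rs.map (fun row => |PySem.List.pyGetD row j 0|)).sum) := by
        apply List.sum_nonneg; intro x hx
        simp only [List.mem_map] at hx
        obtain ⟨row, _, rfl⟩ := hx
        exact abs_nonneg _
      simp only [List.map_cons, List.sum_cons, List.mem_cons, forall_eq_or_imp, ← ih]
      constructor
      · intro h
        have h1 : |PySem.List.pyGetD r j 0| = 0 := by omega
        exact ⟨abs_eq_zero.mp h1, by omega⟩
      · intro ⟨h1, h2⟩
        simp [h1, h2]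

-- A's inner loop is the sum of |row[j]| over the rows
lemma colSumA_eq (matrix : List (List Int)) (j : Int) :
    (PySem.List.pyRange 0 (matrix.length : Int) 1).foldl
        (fun s i => s + |PySem.List.pyGetD (PySem.List.pyGetD matrix i []) j 0|) 0
      = (matrix.map (fun row => |PySem.List.pyGetD row j 0|)).sum := by
  rw [PySem.List.foldl_pyRange_zero_pyGetD' matrix []
      (fun s row => s + |PySem.List.pyGetD row j 0|)]
  rw [PySem.List.foldl_add]
  simp

-- ===== VERDICT (by name: the statement is the Claim_ definition above) =====
theorem zeroColCount_spec : Claim_equal_zeroColCount := by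
  intro matrix _ _
  unfold Spec_zeroColCount zeroColCount zeroColCount_alt
  rw [foldl_filter_rows]
  simp only [colSumA_eq]
  rw [PySem.List.foldl_append_ite_eq_filter, List.nil_append]
  apply List.filter_congr
  intro j _
  rw [Bool.eq_iff_iff]
  simp [sum_abs_eq_zero, List.all_eq_true]
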